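-- pv_equiv track=rewrite | github.com/leebpo/Vuln_Data | log4j.py | reformatted_po
-- ===== SOURCE A (Python) =====
-- import copy
--
-- def group_paths(po):
--     po = po.split("\n")[1:]
--     answer = []
--     current_group = []
--     for p in po:
--         if (p != ''):
--             current_group.append(p)
--         if p[2:3] == "F":
--             answer.append(copy.copy(current_group))
--             current_group.clear()
--     return answer
--
-- def combined_groups(po):
--     grouped_po = group_paths(po)
--     answer = {}
--     for group in grouped_po:
--         path = group[0]
--         inst_v = group[1]
--         fixed_v = group[2]
--         versions = (inst_v, fixed_v)
--         if versions in answer.keys():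
--             answer[versions].append(path)
--         else:
--             answer[versions] = [path]
--     return answer
--
-- def reformatted_po(po):
--     answer = "Plugin Output:\n"
--     groups = combined_groups(po)
--     for key in groups.keys():
--         (inst_v, fixed_v) = key
--         for path in groups[key]:
--             answer = f'{answer}{path}\n'
--         answer = f'{answer}{inst_v}\n{fixed_v}\n\n'
--     return answer
-- ===== SOURCE B (Python) =====
-- def reformatted_po(po):
--     # Reverse-scan parse into (path, inst, fixed) records (built back-to-front,
--     # lines after the last closer fall off naturally), then group without any dict:
--     # for each first-seen version pair, collect its paths by rescanning the records,
--     # and emit the report as a list of lines joined once.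
--     lines = po.split("\n")[1:]
--     recs = []
--     acc = None
--     for q in reversed(lines):
--         if q[2:3] == "F":
--             if acc is not None:
--                 recs.append((acc[0], acc[1], acc[2]))
--             acc = []
--         if q and acc is not None:
--             acc.insert(0, q)
--     if acc is not None:
--         recs.append((acc[0], acc[1], acc[2]))
--     recs.reverse()
--
--     seen = []
--     out = ["Plugin Output:"]
--     for path, inst, fixed in recs:
--         if (inst, fixed) not in seen:
--             seen.append((inst, fixed))
--             out.extend(p for p, a, b in recs if (a, b) == (inst, fixed))
--             out.extend([inst, fixed, ""])
--     return "\n".join(out) + "\n"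
-- ===== Notes on version B (the rewrite author's own statement) =====
-- stated objective: alternative
-- what changed: A scans forward accumulating line-groups, buckets them into a dict keyed by the version pair, and renders by repeated string concatenation over dict keys; B parses the lines in a reverse scan that builds (path, installed, fixed) records back to front (the unclosed trailing group falls off naturally), groups without any dict by rescanning the record list at each first-seen version pair, and renders by joining a list of output lines once.
import Mathlib
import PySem

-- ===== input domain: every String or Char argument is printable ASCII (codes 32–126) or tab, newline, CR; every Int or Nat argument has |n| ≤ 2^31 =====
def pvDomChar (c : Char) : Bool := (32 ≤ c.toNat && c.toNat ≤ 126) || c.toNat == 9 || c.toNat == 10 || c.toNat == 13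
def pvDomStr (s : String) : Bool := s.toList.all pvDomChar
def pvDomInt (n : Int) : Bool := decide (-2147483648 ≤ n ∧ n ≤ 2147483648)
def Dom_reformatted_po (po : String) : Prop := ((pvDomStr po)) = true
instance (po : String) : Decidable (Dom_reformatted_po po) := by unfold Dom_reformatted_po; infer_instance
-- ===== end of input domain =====

-- B replaces A's pipeline (forward grouping of lines, dict bucketing by version pair,
-- rendering by repeated string concatenation over dict keys) with a dict-free one:
-- a reverse scan that builds (path, installed, fixed) records back to front, grouping
-- by rescanning the record list at each first-seen version pair, and a single join of
-- the output lines; objective: alternative.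

-- ===== PORT A =====
-- loop body of group_paths: 'if p != "": current.append(p); if p[2:3] == "F": answer.append(copy(current)); current.clear()'
-- (copy.copy makes a value copy; lists are pure values here)
def pvGroupStep (s : List (List String) × List String) (p : String) :
    List (List String) × List String :=
  let cur := if p ≠ "" then s.2 ++ [p] else s.2
  if PySem.Str.slice p (some 2) (some 3) == "F" then (s.1 ++ [cur], []) else (s.1, cur)

-- po.split("\n")[1:]; split? is `some` since the separator "\n" is nonempty
def pvLines (po : String) : List String :=
  PySem.List.slice ((PySem.Str.split? po "\n").getD []) (some 1) none

def group_paths (po : String) : List (List String) :=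
  ((pvLines po).foldl pvGroupStep ([], [])).1

-- loop body of combined_groups; group[0]/group[1]/group[2] raise IndexError on short groups,
-- which Pre_ excludes, so the "" default of pyGetD is never read inside Pre_
def pvAddGroup (ans : PySem.Dict (String × String) (List String)) (group : List String) :
    PySem.Dict (String × String) (List String) :=
  if ans.contains (PySem.List.pyGetD group 1 "", PySem.List.pyGetD group 2 "") then
    ans.modify (PySem.List.pyGetD group 1 "", PySem.List.pyGetD group 2 "") []
      (fun v => v ++ [PySem.List.pyGetD group 0 ""])
  else
    ans.insert (PySem.List.pyGetD group 1 "", PySem.List.pyGetD group 2 "")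
      [PySem.List.pyGetD group 0 ""]

def combined_groups (po : String) : PySem.Dict (String × String) (List String) :=
  (group_paths po).foldl pvAddGroup PySem.Dict.empty

-- 'groups[key]' is ported as getD _ []; the key comes from groups.keys so the default is never read
def reformatted_po (po : String) : String :=
  (combined_groups po).keys.foldl (fun answer key =>
    (((combined_groups po).getD key []).foldl (fun a path => a ++ path ++ "\n") answer)
      ++ key.1 ++ "\n" ++ key.2 ++ "\n\n") "Plugin Output:\n"

-- ===== PORT B =====
-- B's 'recs.append((acc[0], acc[1], acc[2]))' (pyGetD's "" default unread inside Pre_)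
def pvTriple (g : List String) : String × String × String :=
  (PySem.List.pyGetD g 0 "", PySem.List.pyGetD g 1 "", PySem.List.pyGetD g 2 "")

-- B's reversed-loop body: 'if q[2:3]=="F": (flush acc); acc=[];  if q and acc is not None: acc.insert(0,q)'
def pvRevStep (s : List (String × String × String) × Option (List String)) (q : String) :
    List (String × String × String) × Option (List String) :=
  let s1 := if PySem.Str.slice q (some 2) (some 3) == "F" then
      ((match s.2 with | some g => s.1 ++ [pvTriple g] | none => s.1), some [])
    else s
  match s1.2 with
  | some g => if q ≠ "" then (s1.1, some (q :: g)) else s1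
  | none => s1

-- B's parse: reversed scan, final flush, recs.reverse()
def pvParse (po : String) : List (String × String × String) :=
  let st := (pvLines po).reverse.foldl pvRevStep ([], none)
  (match st.2 with | some g => st.1 ++ [pvTriple g] | none => st.1).reverse

-- B's output loop body over state (seen, out); the generator rescans the full record list
def pvEmit (recs : List (String × String × String))
    (s : List (String × String) × List String) (r : String × String × String) :
    List (String × String) × List String :=
  if s.1.contains (r.2.1, r.2.2) then s
  else (s.1 ++ [(r.2.1, r.2.2)],
        s.2 ++ (recs.filter (fun r' => (r'.2.1, r'.2.2) == (r.2.1, r.2.2))).map (fun r' => r'.1)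
            ++ [r.2.1, r.2.2, ""])

def reformatted_po_alt (po : String) : String :=
  PySem.Str.join "\n"
    (((pvParse po).foldl (pvEmit (pvParse po)) ([], ["Plugin Output:"])).2) ++ "\n"

-- ===== PRECONDITION & SPEC =====
-- shape scan used by Pre_: counts the non-empty lines of the current group
def pvGroupsOk : List String → Nat → Bool
  | [], _ => true
  | p :: rest, n =>
    let n' := if p ≠ "" then n + 1 else n
    if PySem.Str.slice p (some 2) (some 3) == "F" then decide (3 ≤ n') && pvGroupsOk rest 0
    else pvGroupsOk rest n'

-- Pre_ excludes exactly the inputs on which the Python A raises IndexError: a closing line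
-- (third character 'F') arriving while its group holds fewer than 3 non-empty lines, so that
-- group[1] or group[2] does not exist (B raises there too).  Both ports use the same
-- pyGetD default at those reads, so the Lean proof below does not need the hypothesis;
-- Pre_ only marks where the two Pythons return normally.
def Pre_reformatted_po (po : String) : Prop :=
  pvGroupsOk (pvLines po) 0 = true

instance (po : String) : Decidable (Pre_reformatted_po po) := by
  unfold Pre_reformatted_po; infer_instance

def pvWitness_reformatted_po : String := "Plugin Output:\npath1\n1.0\n  Fixed 2.17\npath2\n1.0\n  Fixed 2.17"

def Spec_reformatted_po (po : String) (out : String) : Prop := out = reformatted_po_alt po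
instance (po : String) (out : String) : Decidable (Spec_reformatted_po po out) := by
  unfold Spec_reformatted_po; infer_instance

-- ===== CLAIM (what is proved, stated in full; the proofs are below) =====
def Claim_equal_reformatted_po : Prop :=
  ∀ (po : String), Dom_reformatted_po po → Pre_reformatted_po po →
    Spec_reformatted_po po (reformatted_po po)

-- ===== LEMMAS AND PROOFS =====

-- the common intermediate: the list of (path, inst, fixed) records read off the lines
def pvRecsSpec : List String → List String → List (String × String × String)
  | [], _ => []
  | p :: rest, cur =>
    let g := if p ≠ "" then cur ++ [p] else cur
    if PySem.Str.slice p (some 2) (some 3) == "F" then pvTriple g :: pvRecsSpec rest []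
    else pvRecsSpec rest g

-- the paths of all records whose version pair is k, in record order
def pvPaths (rs : List (String × String × String)) (k : String × String) : List String :=
  (rs.filter (fun r => (r.2.1, r.2.2) == k)).map (fun r => r.1)

-- the first-seen version pairs of rs that are not already in seen, in order
def pvNewKeys : List (String × String × String) → List (String × String) → List (String × String)
  | [], _ => []
  | r :: t, seen =>
    if seen.contains (r.2.1, r.2.2) then pvNewKeys t seen
    else (r.2.1, r.2.2) :: pvNewKeys t (seen ++ [(r.2.1, r.2.2)])

theorem pv_ic_nil (l : List (List Char)) : List.intercalate [] l = l.flatten := by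
  induction l with
  | nil => simp [List.intercalate]
  | cons x t ih =>
    cases t with
    | nil => simp [List.intercalate]
    | cons y s => simp_all [List.intercalate, List.intersperse]

theorem pv_join_cons (x : String) (l : List String) :
    PySem.Str.join "" (x :: l) = x ++ PySem.Str.join "" l := by
  apply String.toList_inj.mp
  simp [PySem.Str.toList_join, PySem.Chars.join, pv_ic_nil]

theorem pv_join_nil : PySem.Str.join "" ([] : List String) = "" := by decide

-- A's inner path loop as a join of pieces
theorem pv_inner (l : List String) : ∀ (a : String),
    l.foldl (fun acc p => acc ++ p ++ "\n") a
      = a ++ PySem.Str.join "" (l.map (fun p => p ++ "\n")) := by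
  induction l with
  | nil => intro a; simp [pv_join_nil]
  | cons x t ih =>
    intro a
    simp only [List.foldl_cons, List.map_cons, ih, pv_join_cons]
    apply String.toList_inj.mp; simp

-- A's outer rendering loop as a join of flattened pieces
theorem pv_render_go (F : (String × String) → List String) :
    ∀ (ks : List (String × String)) (a : String),
    ks.foldl (fun answer key =>
        ((F key).foldl (fun acc p => acc ++ p ++ "\n") answer)
          ++ key.1 ++ "\n" ++ key.2 ++ "\n\n") a
      = a ++ PySem.Str.join ""
          (ks.flatMap (fun k => (F k).map (fun p => p ++ "\n")
            ++ [k.1 ++ "\n" ++ k.2 ++ "\n\n"])) := by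
  intro ks
  induction ks with
  | nil => intro a; simp [pv_join_nil]
  | cons k t ih =>
    intro a
    simp only [List.foldl_cons, List.flatMap_cons]
    rw [pv_inner, ih]
    apply String.toList_inj.mp
    simp [PySem.Str.toList_join, PySem.Chars.join, pv_ic_nil]

theorem pvAddGroup_eq (d : PySem.Dict (String × String) (List String)) (g : List String) :
    pvAddGroup d g
      = d.modify (PySem.List.pyGetD g 1 "", PySem.List.pyGetD g 2 "") []
          (fun v => v ++ [PySem.List.pyGetD g 0 ""]) := by
  unfold pvAddGroup
  have hm : d.modify (PySem.List.pyGetD g 1 "", PySem.List.pyGetD g 2 "") []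
      (fun v => v ++ [PySem.List.pyGetD g 0 ""])
      = d.insert (PySem.List.pyGetD g 1 "", PySem.List.pyGetD g 2 "")
          (d.getD (PySem.List.pyGetD g 1 "", PySem.List.pyGetD g 2 "") []
            ++ [PySem.List.pyGetD g 0 ""]) := rfl
  rw [hm]
  split_ifs with h
  · rfl
  · have hc : d.contains (PySem.List.pyGetD g 1 "", PySem.List.pyGetD g 2 "") = false := by
      simpa using h
    rw [PySem.Dict.getD_of_not_contains d [] hc]
    simp

-- A's grouping pass produces exactly the records of pvRecsSpec
theorem pv_groups_recs : ∀ (lines : List String) (gs : List (List String)) (cur : List String),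
    ((lines.foldl pvGroupStep (gs, cur)).1).map pvTriple
      = gs.map pvTriple ++ pvRecsSpec lines cur := by
  intro lines
  induction lines with
  | nil => intro gs cur; simp [pvRecsSpec]
  | cons p rest ih =>
    intro gs cur
    simp only [List.foldl_cons, pvGroupStep, pvRecsSpec]
    by_cases h : PySem.Str.slice p (some 2) (some 3) == "F"
    · simp only [h, if_true, ih]
      simp
    · simp only [h, Bool.false_eq_true, if_false, ih]

-- A's dict is the modify-fold over the records
theorem pv_dict_eq (po : String) :
    combined_groups po
      = (pvRecsSpec (pvLines po) []).foldl
          (fun d r => d.modify (r.2.1, r.2.2) [] (fun v => v ++ [r.1])) PySem.Dict.empty := by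
  unfold combined_groups
  have h1 : ∀ (groups : List (List String)) (d : PySem.Dict (String × String) (List String)),
      groups.foldl pvAddGroup d
        = (groups.map pvTriple).foldl
            (fun d r => d.modify (r.2.1, r.2.2) [] (fun v => v ++ [r.1])) d := by
    intro groups
    induction groups with
    | nil => intro d; simp
    | cons g t ih =>
      intro d
      simp only [List.foldl_cons, List.map_cons, ih, pvAddGroup_eq]
      rfl
  rw [h1]
  have h2 := pv_groups_recs (pvLines po) [] []
  simp only [List.map_nil, List.nil_append] at h2
  rw [show group_paths po = ((pvLines po).foldl pvGroupStep ([], [])).1 from rfl, h2]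


-- keys of that fold: first-occurrence dedup of the version pairs
theorem pv_keys_eq (rs : List (String × String × String)) :
    ((rs.foldl (fun d r => d.modify (r.2.1, r.2.2) [] (fun v => v ++ [r.1]))
        PySem.Dict.empty).keys)
      = PySem.Set.ofList (rs.map (fun r => (r.2.1, r.2.2))) := by
  rw [PySem.Dict.keys_foldl_modify_key rs (fun r => (r.2.1, r.2.2)) []
        (fun _ r => fun v => v ++ [r.1]) PySem.Dict.empty]
  simp [PySem.Set.update_nil_left]


-- values of that fold: the paths of the matching records
theorem pv_getD_eq (rs : List (String × String × String)) (k : String × String) :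
    ((rs.foldl (fun d r => d.modify (r.2.1, r.2.2) [] (fun v => v ++ [r.1]))
        PySem.Dict.empty).getD k [])
      = pvPaths rs k := by
  have h := PySem.Dict.getD_foldl_modify_append
      (rs.map (fun r => ((r.2.1, r.2.2), r.1))) PySem.Dict.empty k
  rw [List.foldl_map] at h
  simp only [h]
  simp [pvPaths, List.filter_map, List.map_map, Function.comp_def]


-- B's reversed parse produces the same records
theorem pv_closer_ne (q : String) (h : (PySem.Str.slice q (some 2) (some 3) == "F") = true) :
    q ≠ "" := by
  intro hq; subst hq; exact absurd h (by decide)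

theorem pv_rev (lines : List String) :
    (∀ pre, (match (lines.foldr (fun q st => pvRevStep st q) ([], none)).2 with
       | some g => ((lines.foldr (fun q st => pvRevStep st q) ([], none)).1
            ++ [pvTriple (pre ++ g)]).reverse
       | none => ([] : List (String × String × String))) = pvRecsSpec lines pre)
    ∧ ((lines.foldr (fun q st => pvRevStep st q) ([], none)).2 = none
        → (lines.foldr (fun q st => pvRevStep st q) ([], none)).1 = []) := by
  induction lines with
  | nil => exact ⟨fun pre => rfl, fun _ => rfl⟩
  | cons p rest ih =>
    obtain ⟨ih1, ih2⟩ := ih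
    simp only [List.foldr_cons]
    rcases hst : rest.foldr (fun q st => pvRevStep st q) ([], none) with ⟨recs, acc⟩
    rw [hst] at ih1 ih2
    simp only at ih1 ih2
    by_cases hc : (PySem.Str.slice p (some 2) (some 3) == "F") = true
    · have hp : p ≠ "" := pv_closer_ne p hc
      have hstep : pvRevStep (recs, acc) p
          = ((match acc with | some g => recs ++ [pvTriple g] | none => recs), some [p]) := by
        cases acc <;> simp [pvRevStep, hc, hp]
      rw [hstep]
      refine ⟨?_, by intro h; simp at h⟩
      intro pre
      cases acc with
      | some g =>
        have h0 := ih1 []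
        simp only at h0
        simp [pvRecsSpec, hc, hp, ← h0]
      | none =>
        have h2 := ih2 rfl
        have h0 := ih1 []
        simp only at h0
        simp [pvRecsSpec, hc, hp, ← h0, h2]
    · have hcf : (PySem.Str.slice p (some 2) (some 3) == "F") = false := by
        simpa using hc
      by_cases hp : p = ""
      · subst hp
        have hstep : pvRevStep (recs, acc) "" = (recs, acc) := by
          cases acc <;> simp [pvRevStep, hcf]
        rw [hstep]
        refine ⟨?_, ih2⟩
        intro pre
        simp only [pvRecsSpec, hcf]
        simpa using ih1 pre
      · cases acc with
        | some g =>
          have hstep : pvRevStep (recs, some g) p = (recs, some (p :: g)) := by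
            simp [pvRevStep, hcf, hp]
          rw [hstep]
          refine ⟨?_, by intro h; simp at h⟩
          intro pre
          have h0 := ih1 (pre ++ [p])
          simp only at h0
          simp only [pvRecsSpec, hcf, Bool.false_eq_true, if_false]
          rw [if_pos hp]
          simpa using h0
        | none =>
          have hstep : pvRevStep (recs, none) p = (recs, none) := by
            simp [pvRevStep, hcf]
          rw [hstep]
          refine ⟨?_, ih2⟩
          intro pre
          have h0 := ih1 (pre ++ [p])
          simp only at h0
          simp only [pvRecsSpec, hcf, Bool.false_eq_true, if_false]
          rw [if_pos hp]
          simpa using h0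

theorem pv_parse_eq (po : String) : pvParse po = pvRecsSpec (pvLines po) [] := by
  unfold pvParse
  rw [List.foldl_reverse]
  obtain ⟨h1, h2⟩ := pv_rev (pvLines po)
  rcases hst : (pvLines po).foldr (fun q st => pvRevStep st q) ([], none) with ⟨recs, acc⟩
  rw [hst] at h1 h2
  simp only at h1 h2
  cases acc with
  | some g =>
    have h0 := h1 []
    simpa using h0
  | none =>
    have hr := h2 rfl
    have h0 := h1 []
    rw [hr]
    simpa using h0


-- B's output loop emits one block per new key
theorem pv_emit_eq (recs : List (String × String × String)) :
    ∀ (t : List (String × String × String)) (seen : List (String × String)) (out : List String),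
    t.foldl (pvEmit recs) (seen, out)
      = (seen ++ pvNewKeys t seen,
         out ++ (pvNewKeys t seen).flatMap (fun k => pvPaths recs k ++ [k.1, k.2, ""])) := by
  intro t
  induction t with
  | nil => intro seen out; simp [pvNewKeys]
  | cons r t ih =>
    intro seen out
    simp only [List.foldl_cons, pvEmit, pvNewKeys]
    by_cases h : seen.contains (r.2.1, r.2.2)
    · simp only [h, if_true, ih]
    · simp only [h, Bool.false_eq_true, if_false, ih]
      simp [pvPaths, List.flatMap_cons]


-- with nothing seen, the new keys are the first-occurrence dedup of all version pairs
theorem pv_newKeys_gen (rs : List (String × String × String)) :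
    ∀ (seen : List (String × String)),
    pvNewKeys rs seen
      = (PySem.Set.ofList (rs.map (fun r => (r.2.1, r.2.2)))).filter
          (fun k => !(seen.contains k)) := by
  induction rs with
  | nil => intro seen; simp [pvNewKeys, PySem.Set.ofList_nil]
  | cons r t ih =>
    intro seen
    simp only [pvNewKeys, List.map_cons, PySem.Set.ofList_cons]
    by_cases h : seen.contains (r.2.1, r.2.2)
    · simp only [h, if_true, ih]
      rw [List.filter_cons]
      simp only [h, Bool.not_true, Bool.false_eq_true, if_false]
      simp only [PySem.Set.discard, List.filter_filter]
      refine List.filter_congr ?_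
      intro y _
      by_cases hy : y = (r.2.1, r.2.2)
      · subst hy; simp_all
      · simp [hy]
    · simp only [h, Bool.false_eq_true, if_false, ih]
      rw [List.filter_cons]
      simp only [h, Bool.not_false, if_true]
      congr 1
      simp only [PySem.Set.discard, List.filter_filter]
      refine List.filter_congr ?_
      intro y _
      by_cases hy : y = (r.2.1, r.2.2)
      · subst hy; simp
      · simp [hy]

theorem pv_newKeys_nil (rs : List (String × String × String)) :
    pvNewKeys rs [] = PySem.Set.ofList (rs.map (fun r => (r.2.1, r.2.2))) := by
  rw [pv_newKeys_gen]
  simp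


-- '"\n".join(out) + "\n"' over logical lines = concatenation of newline-terminated pieces
theorem pv_join_append (xs ys : List String) :
    PySem.Str.join "" (xs ++ ys) = PySem.Str.join "" xs ++ PySem.Str.join "" ys := by
  apply String.toList_inj.mp
  simp [PySem.Str.toList_join, PySem.Chars.join, pv_ic_nil]

theorem pv_ic_cons_cons (a b : List Char) (t : List (List Char)) :
    List.intercalate ['\n'] (a :: b :: t) = a ++ ['\n'] ++ List.intercalate ['\n'] (b :: t) := by
  simp [List.intercalate, List.intersperse]

theorem pv_chars_lines : ∀ (cs : List (List Char)) (c : List Char),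
    List.intercalate ['\n'] (c :: cs) ++ ['\n'] = ((c :: cs).map (· ++ ['\n'])).flatten := by
  intro cs
  induction cs with
  | nil => intro c; simp [List.intercalate]
  | cons b t ih =>
    intro c
    rw [pv_ic_cons_cons, List.append_assoc (c ++ ['\n']), ih b]
    simp [List.append_assoc]

theorem pv_join_lines (x : String) (l : List String) :
    PySem.Str.join "\n" (x :: l) ++ "\n"
      = PySem.Str.join "" ((x :: l).map (fun p => p ++ "\n")) := by
  apply String.toList_inj.mp
  simp only [String.toList_append, PySem.Str.toList_join, PySem.Chars.join,
    List.map_cons, List.map_map]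
  have h := pv_chars_lines (l.map String.toList) x.toList
  simp only [List.map_cons] at h
  rw [show ("\n" : String).toList = ['\n'] from rfl, h]
  simp [pv_ic_nil, Function.comp_def]


-- the two block shapes join to the same string
theorem pv_blocks (rs : List (String × String × String)) :
    ∀ (ks : List (String × String)),
    PySem.Str.join "" ((ks.flatMap (fun k => pvPaths rs k ++ [k.1, k.2, ""])).map (fun p => p ++ "\n"))
      = PySem.Str.join "" (ks.flatMap (fun k => (pvPaths rs k).map (fun p => p ++ "\n")
          ++ [k.1 ++ "\n" ++ k.2 ++ "\n\n"])) := by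
  intro ks
  induction ks with
  | nil => rfl
  | cons k t ih =>
    simp only [List.flatMap_cons, List.map_append, pv_join_append, ih]
    congr 1
    apply String.toList_inj.mp
    simp [PySem.Str.toList_join, PySem.Chars.join, pv_ic_nil]


-- ===== VERDICT (by name: the statement is the Claim_ definition above) =====
theorem reformatted_po_spec : Claim_equal_reformatted_po := by
  intro po _ _
  unfold Spec_reformatted_po
  unfold reformatted_po reformatted_po_alt
  rw [pv_render_go]
  rw [pv_parse_eq, pv_emit_eq, pv_newKeys_nil, pv_dict_eq, pv_keys_eq]
  simp only [pv_getD_eq, List.singleton_append]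
  rw [pv_join_lines, List.map_cons, pv_join_cons]
  rw [← pv_blocks]
  rfl
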